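-- pv_equiv track=rewrite | github.com/BrianCLong/summit | intelgraph/metacognitive_system.py | _generate_bias_specific_suggestions
-- ===== SOURCE A (Python) =====
-- from typing import Dict, List, Any, Optional
--
-- def _generate_bias_specific_suggestions(potential_biases: List[Dict[str, Any]]) -> List[str]:
--     """Generate bias-specific improvement suggestions."""
--     suggestions = []
--
--     if any(b['type'] == "availability_heuristic" for b in potential_biases):
--         suggestions.append("Use base rate statistics rather than memorable examples")
--
--     if any(b['type'] == "confirmation_bias" for b in potential_biases):
--         suggestions.append("Play devil's advocate with your own reasoning")
--
--     if any(b['type'] == "anchoring_bias" for b in potential_biases):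
--         suggestions.append("Start from different reference points and compare outcomes")
--
--     if any(b['type'] == "emotional_bias" for b in potential_biases):
--         suggestions.append("Wait until emotional state stabilizes before deciding")
--
--     if any(b['type'] == "cognitive_overload" for b in potential_biases):
--         suggestions.append("Reduce decision complexity or seek assistance")
--
--     return suggestions
-- ===== SOURCE B (Python) =====
-- _BIT = {
--     "availability_heuristic": 1,
--     "confirmation_bias": 2,
--     "anchoring_bias": 4,
--     "emotional_bias": 8,
--     "cognitive_overload": 16,
-- }
--
-- _TABLE = [
--     (1, "Use base rate statistics rather than memorable examples"),
--     (2, "Play devil's advocate with your own reasoning"),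
--     (4, "Start from different reference points and compare outcomes"),
--     (8, "Wait until emotional state stabilizes before deciding"),
--     (16, "Reduce decision complexity or seek assistance"),
-- ]
--
-- def _generate_bias_specific_suggestions(potential_biases):
--     """Generate bias-specific improvement suggestions."""
--     mask = 0
--     for b in potential_biases:
--         mask |= _BIT.get(b['type'], 0)
--     return [sugg for bit, sugg in _TABLE if mask & bit]
-- ===== Notes on version B (the rewrite author's own statement) =====
-- stated objective: alternative
-- what changed: Replaces five separate any-scans (one hard-coded if per bias type) by a single pass that ORs a per-type bit into an integer mask, followed by building the output from bit tests against a (bit, suggestion) table.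
import Mathlib
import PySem

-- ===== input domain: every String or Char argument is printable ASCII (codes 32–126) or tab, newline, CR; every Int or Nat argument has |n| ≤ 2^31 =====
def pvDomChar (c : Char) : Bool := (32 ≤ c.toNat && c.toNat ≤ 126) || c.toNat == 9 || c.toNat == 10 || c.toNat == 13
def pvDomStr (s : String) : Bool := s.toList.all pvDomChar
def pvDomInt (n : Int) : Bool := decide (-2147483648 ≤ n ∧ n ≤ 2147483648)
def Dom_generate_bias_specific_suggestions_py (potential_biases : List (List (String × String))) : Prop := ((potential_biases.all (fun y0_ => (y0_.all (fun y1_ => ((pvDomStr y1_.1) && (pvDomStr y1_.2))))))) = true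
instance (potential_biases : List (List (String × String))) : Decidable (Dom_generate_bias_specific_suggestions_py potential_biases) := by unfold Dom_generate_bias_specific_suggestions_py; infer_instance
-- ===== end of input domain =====

-- B is an alternative single-pass rewrite: one scan ORs a per-type bit into an
-- integer mask, then the output is built from bit tests against a data table,
-- instead of A's five separate any-scans.

-- ===== PORT A =====
-- b['type'] (first-match lookup; KeyError when the key is absent is excluded by Pre_)
def pvGetType (b : List (String × String)) : String :=
  (List.lookup "type" b).getD ""

def generate_bias_specific_suggestions_py (potential_biases : List (List (String × String))) : List String :=
  let s0 : List String := []
  let s1 := if potential_biases.any (fun b => pvGetType b == "availability_heuristic")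
            then s0 ++ ["Use base rate statistics rather than memorable examples"] else s0
  let s2 := if potential_biases.any (fun b => pvGetType b == "confirmation_bias")
            then s1 ++ ["Play devil's advocate with your own reasoning"] else s1
  let s3 := if potential_biases.any (fun b => pvGetType b == "anchoring_bias")
            then s2 ++ ["Start from different reference points and compare outcomes"] else s2
  let s4 := if potential_biases.any (fun b => pvGetType b == "emotional_bias")
            then s3 ++ ["Wait until emotional state stabilizes before deciding"] else s3
  let s5 := if potential_biases.any (fun b => pvGetType b == "cognitive_overload")
            then s4 ++ ["Reduce decision complexity or seek assistance"] else s4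
  s5

-- ===== PORT B =====
-- _BIT.get(t, 0)
def pvBitDict : PySem.Dict String Nat :=
  PySem.Dict.mk
  [("availability_heuristic", 1), ("confirmation_bias", 2), ("anchoring_bias", 4),
   ("emotional_bias", 8), ("cognitive_overload", 16)]

def pvBitTable : List (Nat × String) :=
  [(1, "Use base rate statistics rather than memorable examples"),
   (2, "Play devil's advocate with your own reasoning"),
   (4, "Start from different reference points and compare outcomes"),
   (8, "Wait until emotional state stabilizes before deciding"),
   (16, "Reduce decision complexity or seek assistance")]

def generate_bias_specific_suggestions_py_alt (potential_biases : List (List (String × String))) : List String :=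
  let mask : Nat := potential_biases.foldl
    (fun m b => m ||| PySem.Dict.getD pvBitDict (pvGetType b) 0) 0
  (pvBitTable.filter (fun p => mask &&& p.1 != 0)).map (fun p => p.2)

-- ===== PRECONDITION & SPEC =====
-- Pre_ excludes inputs where some dict lacks the key 'type': there A either raises
-- KeyError or (when every any-scan short-circuits first) returns by accident, while
-- B's loop body always raises; such inputs are outside the natural domain.
def Pre_generate_bias_specific_suggestions_py (potential_biases : List (List (String × String))) : Prop :=
  (potential_biases.all (fun b => b.any (fun p => p.1 == "type"))) = true
instance (potential_biases : List (List (String × String))) : Decidable (Pre_generate_bias_specific_suggestions_py potential_biases) := by unfold Pre_generate_bias_specific_suggestions_py; infer_instance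

def pvWitness_generate_bias_specific_suggestions_py : (List (List (String × String))) :=
  [[("type", "confirmation_bias")], [("type", "other")]]

def Spec_generate_bias_specific_suggestions_py (potential_biases : List (List (String × String))) (out : List String) : Prop := out = generate_bias_specific_suggestions_py_alt potential_biases
instance (potential_biases : List (List (String × String))) (out : List String) : Decidable (Spec_generate_bias_specific_suggestions_py potential_biases out) := by unfold Spec_generate_bias_specific_suggestions_py; infer_instance

-- ===== CLAIM (what is proved, stated in full; the proofs are below) =====
def Claim_equal_generate_bias_specific_suggestions_py : Prop := ∀ (potential_biases : List (List (String × String))), Dom_generate_bias_specific_suggestions_py potential_biases → Pre_generate_bias_specific_suggestions_py potential_biases → Spec_generate_bias_specific_suggestions_py potential_biases (generate_bias_specific_suggestions_py potential_biases)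

-- ===== LEMMAS AND PROOFS =====
theorem pv_testBit_fold (pb : List (List (String × String))) (m : Nat) (i : Nat) :
    (pb.foldl (fun m b => m ||| PySem.Dict.getD pvBitDict (pvGetType b) 0) m).testBit i
      = (m.testBit i || pb.any (fun b => (PySem.Dict.getD pvBitDict (pvGetType b) 0).testBit i)) := by
  induction pb generalizing m with
  | nil => simp
  | cons b t ih => simp [ih, Nat.testBit_or, Bool.or_assoc]

theorem pv_bit_testBit (b : List (String × String)) :
    ((PySem.Dict.getD pvBitDict (pvGetType b) 0).testBit 0 = (pvGetType b == "availability_heuristic"))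
  ∧ ((PySem.Dict.getD pvBitDict (pvGetType b) 0).testBit 1 = (pvGetType b == "confirmation_bias"))
  ∧ ((PySem.Dict.getD pvBitDict (pvGetType b) 0).testBit 2 = (pvGetType b == "anchoring_bias"))
  ∧ ((PySem.Dict.getD pvBitDict (pvGetType b) 0).testBit 3 = (pvGetType b == "emotional_bias"))
  ∧ ((PySem.Dict.getD pvBitDict (pvGetType b) 0).testBit 4 = (pvGetType b == "cognitive_overload")) := by
  by_cases h1 : pvGetType b = "availability_heuristic"
  · simp only [h1]; decide
  by_cases h2 : pvGetType b = "confirmation_bias"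
  · simp only [h2]; decide
  by_cases h3 : pvGetType b = "anchoring_bias"
  · simp only [h3]; decide
  by_cases h4 : pvGetType b = "emotional_bias"
  · simp only [h4]; decide
  by_cases h5 : pvGetType b = "cognitive_overload"
  · simp only [h5]; decide
  have hg : PySem.Dict.getD pvBitDict (pvGetType b) 0 = 0 := by
    simp [pvBitDict, PySem.Dict.getD,
      Ne.symm h1, Ne.symm h2, Ne.symm h3, Ne.symm h4, Ne.symm h5, PySem.Dict.get?]
  simp [hg, h1, h2, h3, h4, h5]

theorem pv_and_pow (n i : Nat) : (n &&& 2^i != 0) = n.testBit i := by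
  rw [Nat.and_two_pow]; cases h : n.testBit i <;> simp

-- ===== VERDICT (by name: the statement is the Claim_ definition above) =====
theorem generate_bias_specific_suggestions_py_spec : Claim_equal_generate_bias_specific_suggestions_py := by
  intro pb _ _
  unfold Spec_generate_bias_specific_suggestions_py
  unfold generate_bias_specific_suggestions_py generate_bias_specific_suggestions_py_alt
  have hmask : ∀ i : Nat,
      (pb.foldl (fun m b => m ||| PySem.Dict.getD pvBitDict (pvGetType b) 0) 0).testBit i
        = pb.any (fun b => (PySem.Dict.getD pvBitDict (pvGetType b) 0).testBit i) := by
    intro i; simp [pv_testBit_fold]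
  set mask := pb.foldl (fun m b => m ||| PySem.Dict.getD pvBitDict (pvGetType b) 0) 0 with hm
  have e1 : (mask &&& 1 != 0) = pb.any (fun b => pvGetType b == "availability_heuristic") := by
    rw [show (1:Nat) = 2^0 by norm_num, pv_and_pow, hmask]
    exact List.any_congr rfl (fun b => (pv_bit_testBit b).1)
  have e2 : (mask &&& 2 != 0) = pb.any (fun b => pvGetType b == "confirmation_bias") := by
    rw [show (2:Nat) = 2^1 by norm_num, pv_and_pow, hmask]
    exact List.any_congr rfl (fun b => (pv_bit_testBit b).2.1)
  have e3 : (mask &&& 4 != 0) = pb.any (fun b => pvGetType b == "anchoring_bias") := by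
    rw [show (4:Nat) = 2^2 by norm_num, pv_and_pow, hmask]
    exact List.any_congr rfl (fun b => (pv_bit_testBit b).2.2.1)
  have e4 : (mask &&& 8 != 0) = pb.any (fun b => pvGetType b == "emotional_bias") := by
    rw [show (8:Nat) = 2^3 by norm_num, pv_and_pow, hmask]
    exact List.any_congr rfl (fun b => (pv_bit_testBit b).2.2.2.1)
  have e5 : (mask &&& 16 != 0) = pb.any (fun b => pvGetType b == "cognitive_overload") := by
    rw [show (16:Nat) = 2^4 by norm_num, pv_and_pow, hmask]
    exact List.any_congr rfl (fun b => (pv_bit_testBit b).2.2.2.2)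
  simp only [pvBitTable, List.filter, e1, e2, e3, e4, e5]
  cases h1 : pb.any (fun b => pvGetType b == "availability_heuristic") <;>
  cases h2 : pb.any (fun b => pvGetType b == "confirmation_bias") <;>
  cases h3 : pb.any (fun b => pvGetType b == "anchoring_bias") <;>
  cases h4 : pb.any (fun b => pvGetType b == "emotional_bias") <;>
  cases h5 : pb.any (fun b => pvGetType b == "cognitive_overload") <;>
  simp_all
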